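-- pv_equiv track=rewrite | github.com/Minerstove/Python | cs11/hope-1/(download_and_submit_code_here!)_offline_judge/7_mkns2/student_solution.py | mkns_2
-- ===== SOURCE A (Python) =====
-- def mkns_2(M,ML,TL,MI):
--
--     def find_intersections(tup1, tup2):
--
--         intersection = tuple(frozenset(tup1) & frozenset(tup2))
--
--         return tuple(msg for msg in M if msg in intersection)
--
--     delulu = find_intersections(ML,TL)
--     may_chance = find_intersections(TL,MI)
--     wag_red_flag = find_intersections(MI,ML)
--
--     return((delulu, may_chance, wag_red_flag))
-- ===== SOURCE B (Python) =====
-- def mkns_2(M, ML, TL, MI):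
--     # Single ordered pass over M; membership sets built once.
--     s_ml, s_tl, s_mi = set(ML), set(TL), set(MI)
--     delulu, may_chance, wag_red_flag = [], [], []
--     for msg in M:
--         in_ml, in_tl, in_mi = msg in s_ml, msg in s_tl, msg in s_mi
--         if in_ml and in_tl:
--             delulu.append(msg)
--         if in_tl and in_mi:
--             may_chance.append(msg)
--         if in_mi and in_ml:
--             wag_red_flag.append(msg)
--     return (tuple(delulu), tuple(may_chance), tuple(wag_red_flag))
-- ===== Notes on version B (the rewrite author's own statement) =====
-- stated objective: faster
-- what changed: Replaces A's three independent intersect-then-filter passes over M (each testing membership in a tuple, linear per element) with three hash sets built once and a single combined pass over M that routes each message to the right result lists.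
import Mathlib
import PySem

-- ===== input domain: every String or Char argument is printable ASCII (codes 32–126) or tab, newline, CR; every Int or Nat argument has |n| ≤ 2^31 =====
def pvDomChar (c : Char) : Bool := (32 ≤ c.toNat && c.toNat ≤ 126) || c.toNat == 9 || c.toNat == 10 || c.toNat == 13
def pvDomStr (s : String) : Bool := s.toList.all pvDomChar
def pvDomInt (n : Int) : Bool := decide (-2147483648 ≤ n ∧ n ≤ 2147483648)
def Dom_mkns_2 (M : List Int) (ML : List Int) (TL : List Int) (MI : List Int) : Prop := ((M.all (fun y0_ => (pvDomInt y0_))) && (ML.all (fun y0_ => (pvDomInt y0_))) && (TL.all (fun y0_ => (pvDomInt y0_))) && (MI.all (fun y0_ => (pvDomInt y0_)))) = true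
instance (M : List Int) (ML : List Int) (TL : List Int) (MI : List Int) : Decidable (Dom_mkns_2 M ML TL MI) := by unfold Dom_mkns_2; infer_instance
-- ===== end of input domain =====

-- B replaces A's three intersect-then-filter passes over M with membership sets built
-- once and a single combined pass over M (constant-factor change; return value only).

-- ===== PORT A =====
-- find_intersections: intersection of the two tuples as a set, then the msgs of M in it
def pvFindIntersections (M : List Int) (tup1 : List Int) (tup2 : List Int) : List Int :=
  let intersection := PySem.Set.inter (PySem.Set.ofList tup1) (PySem.Set.ofList tup2)
  M.filter (fun msg => decide (msg ∈ intersection))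

def mkns_2 (M : List Int) (ML : List Int) (TL : List Int) (MI : List Int) : List (List Int) :=
  let delulu := pvFindIntersections M ML TL
  let may_chance := pvFindIntersections M TL MI
  let wag_red_flag := pvFindIntersections M MI ML
  [delulu, may_chance, wag_red_flag]

-- ===== PORT B =====
def mkns_2_alt (M : List Int) (ML : List Int) (TL : List Int) (MI : List Int) : List (List Int) :=
  let sML := PySem.Set.ofList ML
  let sTL := PySem.Set.ofList TL
  let sMI := PySem.Set.ofList MI
  let r := M.foldl (fun (acc : List Int × List Int × List Int) msg =>
    let inML := decide (msg ∈ sML)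
    let inTL := decide (msg ∈ sTL)
    let inMI := decide (msg ∈ sMI)
    ((if inML && inTL then acc.1 ++ [msg] else acc.1),
     (if inTL && inMI then acc.2.1 ++ [msg] else acc.2.1),
     (if inMI && inML then acc.2.2 ++ [msg] else acc.2.2))) ([], [], [])
  [r.1, r.2.1, r.2.2]

-- ===== PRECONDITION & SPEC =====
def Spec_mkns_2 (M : List Int) (ML : List Int) (TL : List Int) (MI : List Int) (out : List (List Int)) : Prop := out = mkns_2_alt M ML TL MI
instance (M : List Int) (ML : List Int) (TL : List Int) (MI : List Int) (out : List (List Int)) : Decidable (Spec_mkns_2 M ML TL MI out) := by unfold Spec_mkns_2; infer_instance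

-- ===== CLAIM =====
def Claim_equal_mkns_2 : Prop := ∀ (M : List Int) (ML : List Int) (TL : List Int) (MI : List Int), Dom_mkns_2 M ML TL MI → Spec_mkns_2 M ML TL MI (mkns_2 M ML TL MI)

-- ===== LEMMAS AND PROOFS =====

-- B's combined fold equals three appended filters of M
theorem pvFold_eq_filters (M : List Int) (p1 p2 p3 : Int → Bool)
    (d c w : List Int) :
    M.foldl (fun (acc : List Int × List Int × List Int) msg =>
      ((if p1 msg then acc.1 ++ [msg] else acc.1),
       (if p2 msg then acc.2.1 ++ [msg] else acc.2.1),
       (if p3 msg then acc.2.2 ++ [msg] else acc.2.2))) (d, c, w)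
    = (d ++ M.filter p1, c ++ M.filter p2, w ++ M.filter p3) := by
  induction M generalizing d c w with
  | nil => simp
  | cons m t ih =>
    simp only [List.foldl_cons, List.filter_cons]
    rw [ih]
    by_cases h1 : p1 m <;> by_cases h2 : p2 m <;> by_cases h3 : p3 m <;>
      simp [h1, h2, h3]

-- ===== VERDICT =====
theorem mkns_2_spec : Claim_equal_mkns_2 := by
  intro M ML TL MI _
  unfold Spec_mkns_2 mkns_2 mkns_2_alt pvFindIntersections
  simp only []
  rw [pvFold_eq_filters]
  simp [PySem.Set.mem_inter, PySem.Set.mem_ofList]
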